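-- pv_equiv track=rewrite | github.com/SanTiwari07/KrishiSahAI | Backend/services/FiveToTenYear/roadmap_service.py | get_business_metadata
-- ===== SOURCE A (Python) =====
-- BUSINESS_OPTIONS = [
--     {"id": "1", "title": "FLOWER PLANTATION (GERBERA)"},
--     {"id": "2", "title": "PACKAGED DRINKING WATER BUSINESS"},
--     {"id": "3", "title": "AMUL FRANCHISE BUSINESS"},
--     {"id": "4", "title": "SPIRULINA FARMING (ALGAE)"},
--     {"id": "5", "title": "DAIRY FARMING (6–8 COW UNIT)"},
--     {"id": "6", "title": "GOAT MILK FARMING (20–25 MILCH GOATS UNIT)"},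
--     {"id": "7", "title": "MUSHROOM FARMING (OYSTER)"},
--     {"id": "8", "title": "POULTRY FARMING (BROILER)"},
--     {"id": "9", "title": "VERMICOMPOST PRODUCTION"},
--     {"id": "10", "title": "PLANT NURSERY"},
--     {"id": "11", "title": "COW DUNG ORGANIC MANURE & BIO-INPUTS"},
--     {"id": "12", "title": "COW DUNG PRODUCTS (DHOOP, DIYAS)"},
--     {"id": "13", "title": "LEAF PLATE (DONA–PATTAL) MANUFACTURING"},
--     {"id": "14", "title": "AGRI-INPUT TRADING"},
--     {"id": "15", "title": "INLAND FISH FARMING (POND-BASED)"}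
-- ]
--
-- def get_business_metadata(business_title_or_id):
--     # normalize input
--     search = business_title_or_id.lower().strip()
--     for b in BUSINESS_OPTIONS:
--         if b['id'] == search or b['title'].lower() == search:
--             return b
--     # fallback if exact match fails, try partial
--     for b in BUSINESS_OPTIONS:
--         if search in b['title'].lower():
--             return b
--     return {"title": business_title_or_id, "id": "unknown"}
-- ===== SOURCE B (Python) =====
-- BUSINESS_OPTIONS = [
--     {"id": "1", "title": "FLOWER PLANTATION (GERBERA)"},
--     {"id": "2", "title": "PACKAGED DRINKING WATER BUSINESS"},
--     {"id": "3", "title": "AMUL FRANCHISE BUSINESS"},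
--     {"id": "4", "title": "SPIRULINA FARMING (ALGAE)"},
--     {"id": "5", "title": "DAIRY FARMING (6–8 COW UNIT)"},
--     {"id": "6", "title": "GOAT MILK FARMING (20–25 MILCH GOATS UNIT)"},
--     {"id": "7", "title": "MUSHROOM FARMING (OYSTER)"},
--     {"id": "8", "title": "POULTRY FARMING (BROILER)"},
--     {"id": "9", "title": "VERMICOMPOST PRODUCTION"},
--     {"id": "10", "title": "PLANT NURSERY"},
--     {"id": "11", "title": "COW DUNG ORGANIC MANURE & BIO-INPUTS"},
--     {"id": "12", "title": "COW DUNG PRODUCTS (DHOOP, DIYAS)"},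
--     {"id": "13", "title": "LEAF PLATE (DONA–PATTAL) MANUFACTURING"},
--     {"id": "14", "title": "AGRI-INPUT TRADING"},
--     {"id": "15", "title": "INLAND FISH FARMING (POND-BASED)"}
-- ]
--
--
-- def get_business_metadata(business_title_or_id):
--     search = business_title_or_id.lower().strip()
--     partial = None
--     for b in BUSINESS_OPTIONS:
--         title = b['title'].lower()
--         if b['id'] == search or title == search:
--             return b  # exact match always wins
--         if partial is None and search in title:
--             partial = b  # remember first partial match, keep looking for an exact one
--     if partial is not None:
--         return partial
--     return {"title": business_title_or_id, "id": "unknown"}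
-- ===== Notes on version B (the rewrite author's own statement) =====
-- stated objective: simpler
-- what changed: Replaces A's two sequential scans (exact pass, then partial pass) with a single scan that returns immediately on an exact match and remembers the first partial match in one accumulator.
import Mathlib
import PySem

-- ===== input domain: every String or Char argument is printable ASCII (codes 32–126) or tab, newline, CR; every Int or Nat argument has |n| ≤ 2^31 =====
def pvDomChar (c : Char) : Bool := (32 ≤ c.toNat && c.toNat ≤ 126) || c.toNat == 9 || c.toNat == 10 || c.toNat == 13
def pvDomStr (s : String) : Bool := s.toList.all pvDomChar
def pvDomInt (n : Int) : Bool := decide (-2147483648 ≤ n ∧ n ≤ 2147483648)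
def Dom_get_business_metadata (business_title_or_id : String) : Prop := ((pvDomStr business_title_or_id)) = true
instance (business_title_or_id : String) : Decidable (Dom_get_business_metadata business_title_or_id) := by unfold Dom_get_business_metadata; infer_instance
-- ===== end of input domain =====

-- B merges A's two scans (exact pass, then partial pass) into one scan with a `partial` accumulator; same return value everywhere.

-- ===== PORT A =====
-- each Python dict literal {"id": …, "title": …} is a PySem.Dict with those two keys;
-- b['id'] / b['title'] is Dict.getD with those keys always present, so getD = Python's b[k] here (never the default).
def bizOptions : List (PySem.Dict String String) :=
  [⟨[("id", "1"), ("title", "FLOWER PLANTATION (GERBERA)")]⟩,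
   ⟨[("id", "2"), ("title", "PACKAGED DRINKING WATER BUSINESS")]⟩,
   ⟨[("id", "3"), ("title", "AMUL FRANCHISE BUSINESS")]⟩,
   ⟨[("id", "4"), ("title", "SPIRULINA FARMING (ALGAE)")]⟩,
   ⟨[("id", "5"), ("title", "DAIRY FARMING (6–8 COW UNIT)")]⟩,
   ⟨[("id", "6"), ("title", "GOAT MILK FARMING (20–25 MILCH GOATS UNIT)")]⟩,
   ⟨[("id", "7"), ("title", "MUSHROOM FARMING (OYSTER)")]⟩,
   ⟨[("id", "8"), ("title", "POULTRY FARMING (BROILER)")]⟩,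
   ⟨[("id", "9"), ("title", "VERMICOMPOST PRODUCTION")]⟩,
   ⟨[("id", "10"), ("title", "PLANT NURSERY")]⟩,
   ⟨[("id", "11"), ("title", "COW DUNG ORGANIC MANURE & BIO-INPUTS")]⟩,
   ⟨[("id", "12"), ("title", "COW DUNG PRODUCTS (DHOOP, DIYAS)")]⟩,
   ⟨[("id", "13"), ("title", "LEAF PLATE (DONA–PATTAL) MANUFACTURING")]⟩,
   ⟨[("id", "14"), ("title", "AGRI-INPUT TRADING")]⟩,
   ⟨[("id", "15"), ("title", "INLAND FISH FARMING (POND-BASED)")]⟩]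

-- A's first loop: first b with b['id'] == search or b['title'].lower() == search
def aExactLoop (search : String) : List (PySem.Dict String String) → Option (PySem.Dict String String)
  | [] => none
  | b :: rest =>
    if PySem.Dict.getD b "id" "" == search || PySem.Str.lower (PySem.Dict.getD b "title" "") == search
    then some b else aExactLoop search rest

-- A's second loop: first b with search in b['title'].lower()
def aPartialLoop (search : String) : List (PySem.Dict String String) → Option (PySem.Dict String String)
  | [] => none
  | b :: rest =>
    if PySem.Str.isIn search (PySem.Str.lower (PySem.Dict.getD b "title" ""))
    then some b else aPartialLoop search rest

def get_business_metadata (business_title_or_id : String) : List (String × String) :=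
  let search := PySem.Str.strip (PySem.Str.lower business_title_or_id)
  match aExactLoop search bizOptions with
  | some b => b.items
  | none =>
    match aPartialLoop search bizOptions with
    | some b => b.items
    | none => [("title", business_title_or_id), ("id", "unknown")]

-- ===== PORT B =====
-- B's single loop: return b on an exact match; remember the first partial match in `part`; return `part` at the end.
def bLoop (search : String) : List (PySem.Dict String String) → Option (PySem.Dict String String) → Option (PySem.Dict String String)
  | [], part => part
  | b :: rest, part =>
    let title := PySem.Str.lower (PySem.Dict.getD b "title" "")
    if PySem.Dict.getD b "id" "" == search || title == search then some b
    else bLoop search rest (if part.isNone && PySem.Str.isIn search title then some b else part)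

def get_business_metadata_alt (business_title_or_id : String) : List (String × String) :=
  let search := PySem.Str.strip (PySem.Str.lower business_title_or_id)
  match bLoop search bizOptions none with
  | some b => b.items
  | none => [("title", business_title_or_id), ("id", "unknown")]

-- ===== PRECONDITION & SPEC =====
def Spec_get_business_metadata (business_title_or_id : String) (out : List (String × String)) : Prop := out = get_business_metadata_alt business_title_or_id
instance (business_title_or_id : String) (out : List (String × String)) : Decidable (Spec_get_business_metadata business_title_or_id out) := by unfold Spec_get_business_metadata; infer_instance

-- ===== CLAIM (what is proved, stated in full; the proofs are below) =====
def Claim_equal_get_business_metadata : Prop := ∀ (business_title_or_id : String), Dom_get_business_metadata business_title_or_id → Spec_get_business_metadata business_title_or_id (get_business_metadata business_title_or_id)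

-- ===== LEMMAS AND PROOFS =====

-- loop invariant: B's single pass computes "first exact, else the pending partial, else first partial"
theorem bLoop_eq (search : String) (l : List (PySem.Dict String String))
    (part : Option (PySem.Dict String String)) :
    bLoop search l part = ((aExactLoop search l).or (part.or (aPartialLoop search l))) := by
  induction l generalizing part with
  | nil => simp [bLoop, aExactLoop, aPartialLoop]
  | cons b rest ih =>
    simp only [bLoop, aExactLoop, aPartialLoop]
    by_cases hx : (PySem.Dict.getD b "id" "" == search
        || PySem.Str.lower (PySem.Dict.getD b "title" "") == search) = true
    · simp [hx]
    · simp only [hx, if_false, Bool.false_eq_true, ih]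
      cases part with
      | some p => simp
      | none =>
        split_ifs <;> simp_all

-- ===== VERDICT (by name: the statement is the Claim_ definition above) =====
theorem get_business_metadata_spec : Claim_equal_get_business_metadata := by
  intro s _
  unfold Spec_get_business_metadata get_business_metadata get_business_metadata_alt
  simp only [bLoop_eq]
  cases hx : aExactLoop (PySem.Str.strip (PySem.Str.lower s)) bizOptions with
  | some b => simp [Option.or]
  | none =>
    cases hp : aPartialLoop (PySem.Str.strip (PySem.Str.lower s)) bizOptions with
    | some b => simp [Option.or]
    | none => simp [Option.or]
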